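-- pv_equiv track=rewrite | github.com/Mnex0/projet_cir2 | python/import_py_fixed.py | associe_INSEE
-- ===== SOURCE A (Python) =====
-- def associe_INSEE(communes: list, ville, code_postal):
--     if code_postal == 'NULL' or ville == 'NULL':
--         return 'NULL'
--
--     # Recherche exacte par code postal et nom de ville
--     for i in range(1, len(communes)):  # Commence à 1 pour éviter l'en-tête
--         if (communes[i][6] == code_postal and communes[i][1].lower() == ville.lower()):
--             return f'"{communes[i][0]}"'
--
--     # Si pas trouvé, recherche par code postal seulement
--     for i in range(1, len(communes)):
--         if communes[i][6] == code_postal: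
--             return f'"{communes[i][0]}"'
--
--     return 'NULL'  # Si aucune correspondance trouvée
-- ===== SOURCE B (Python) =====
-- def associe_INSEE(communes: list, ville, code_postal):
--     if code_postal == 'NULL' or ville == 'NULL':
--         return 'NULL'
--     v = ville.lower()
--     fallback = None
--     for row in communes[1:]:
--         if row[6] == code_postal:
--             if row[1].lower() == v:
--                 return f'"{row[0]}"'
--             if fallback is None:
--                 fallback = row[0]
--     return f'"{fallback}"' if fallback is not None else 'NULL'
-- ===== Notes on version B (the rewrite author's own statement) =====
-- stated objective: alternative
-- what changed: Replaces A's two full scans (exact-match pass, then code-postal-only pass) with a single loop over communes[1:] that returns on an exact match and records the first code-postal-only hit as a fallback.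
import Mathlib
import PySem

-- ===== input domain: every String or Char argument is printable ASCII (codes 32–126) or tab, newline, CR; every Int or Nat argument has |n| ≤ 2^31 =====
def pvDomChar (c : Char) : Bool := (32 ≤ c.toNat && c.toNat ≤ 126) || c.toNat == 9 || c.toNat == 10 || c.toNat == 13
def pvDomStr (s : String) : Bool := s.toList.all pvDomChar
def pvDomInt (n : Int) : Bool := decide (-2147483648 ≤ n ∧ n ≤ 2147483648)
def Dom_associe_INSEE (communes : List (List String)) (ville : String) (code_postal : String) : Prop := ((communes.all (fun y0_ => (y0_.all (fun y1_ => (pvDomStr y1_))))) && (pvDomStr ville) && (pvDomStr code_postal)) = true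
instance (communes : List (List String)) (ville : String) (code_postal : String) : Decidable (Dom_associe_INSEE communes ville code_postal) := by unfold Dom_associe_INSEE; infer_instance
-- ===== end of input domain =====

-- B merges A's two scans into one pass that keeps a first-code-postal-hit fallback; return value only.

-- ===== PORT A =====
-- first loop of A: first row with row[6] == code_postal and row[1].lower() == ville.lower()
def aLoop1 (rows : List (List String)) (ville code_postal : String) : Option String :=
  match rows with
  | [] => none
  | row :: rest =>
    if PySem.List.pyGetD row 6 "" = code_postal ∧
       PySem.Str.lower (PySem.List.pyGetD row 1 "") = PySem.Str.lower ville then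
      some ("\"" ++ PySem.List.pyGetD row 0 "" ++ "\"")
    else aLoop1 rest ville code_postal

-- second loop of A: first row with row[6] == code_postal
def aLoop2 (rows : List (List String)) (code_postal : String) : Option String :=
  match rows with
  | [] => none
  | row :: rest =>
    if PySem.List.pyGetD row 6 "" = code_postal then
      some ("\"" ++ PySem.List.pyGetD row 0 "" ++ "\"")
    else aLoop2 rest code_postal

def associe_INSEE (communes : List (List String)) (ville : String) (code_postal : String) : String :=
  if code_postal = "NULL" ∨ ville = "NULL" then "NULL"
  else
    match aLoop1 (communes.drop 1) ville code_postal with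
    | some s => s
    | none =>
      match aLoop2 (communes.drop 1) code_postal with
      | some s => s
      | none => "NULL"

-- ===== PORT B =====
-- single pass with a fallback accumulator (first code-postal-only hit)
def bLoop (rows : List (List String)) (v code_postal : String) (fallback : Option String) : String :=
  match rows with
  | [] =>
    match fallback with
    | some c => "\"" ++ c ++ "\""
    | none => "NULL"
  | row :: rest =>
    if PySem.List.pyGetD row 6 "" = code_postal then
      if PySem.Str.lower (PySem.List.pyGetD row 1 "") = v then
        "\"" ++ PySem.List.pyGetD row 0 "" ++ "\""
      else
        bLoop rest v code_postal
          (if fallback = none then some (PySem.List.pyGetD row 0 "") else fallback)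
    else bLoop rest v code_postal fallback

def associe_INSEE_alt (communes : List (List String)) (ville : String) (code_postal : String) : String :=
  if code_postal = "NULL" ∨ ville = "NULL" then "NULL"
  else bLoop (communes.drop 1) (PySem.Str.lower ville) code_postal none

-- ===== PRECONDITION & SPEC =====
-- Pre_ excludes inputs (when the NULL guard does not fire) where some non-header row has fewer
-- than 7 columns: there the Python A raises IndexError on row[6], except when an earlier row
-- already matched exactly — those few returning inputs are also excluded (see cites), B agrees there too.
def Pre_associe_INSEE (communes : List (List String)) (ville : String) (code_postal : String) : Prop :=
  code_postal = "NULL" ∨ ville = "NULL" ∨ ∀ row ∈ communes.drop 1, 7 ≤ row.length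
instance (communes : List (List String)) (ville : String) (code_postal : String) : Decidable (Pre_associe_INSEE communes ville code_postal) := by unfold Pre_associe_INSEE; infer_instance

def pvWitness_associe_INSEE : List (List String) × String × String :=
  ([["h"], ["75056", "Paris", "", "", "", "", "75001"]], "Paris", "75001")

def Spec_associe_INSEE (communes : List (List String)) (ville : String) (code_postal : String) (out : String) : Prop := out = associe_INSEE_alt communes ville code_postal
instance (communes : List (List String)) (ville : String) (code_postal : String) (out : String) : Decidable (Spec_associe_INSEE communes ville code_postal out) := by unfold Spec_associe_INSEE; infer_instance

-- ===== CLAIM (what is proved, stated in full; the proofs are below) =====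
def Claim_equal_associe_INSEE : Prop := ∀ (communes : List (List String)) (ville : String) (code_postal : String), Dom_associe_INSEE communes ville code_postal → Pre_associe_INSEE communes ville code_postal → Spec_associe_INSEE communes ville code_postal (associe_INSEE communes ville code_postal)

-- ===== LEMMAS AND PROOFS =====

-- Single-pass invariant: bLoop with a recorded fallback equals "exact match first, else
-- fallback, else first code-postal-only match, else NULL".
lemma bLoop_eq (rows : List (List String)) (ville code_postal : String)
    (fallback : Option String) :
    bLoop rows (PySem.Str.lower ville) code_postal fallback =
      match aLoop1 rows ville code_postal with
      | some s => s
      | none =>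
        match fallback with
        | some c => "\"" ++ c ++ "\""
        | none =>
          match aLoop2 rows code_postal with
          | some s => s
          | none => "NULL" := by
  induction rows generalizing fallback with
  | nil => simp [bLoop, aLoop1, aLoop2]
  | cons row rest ih =>
    by_cases h6 : PySem.List.pyGetD row 6 "" = code_postal
    · by_cases h1 : PySem.Str.lower (PySem.List.pyGetD row 1 "") = PySem.Str.lower ville
      · simp [bLoop, aLoop1, h6, h1]
      · cases fallback with
        | none => simp [bLoop, aLoop1, aLoop2, h6, h1, ih]
        | some c => simp [bLoop, aLoop1, h6, h1, ih]
    · simp [bLoop, aLoop1, aLoop2, h6, ih]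

-- ===== VERDICT (by name: the statement is the Claim_ definition above) =====
theorem associe_INSEE_spec : Claim_equal_associe_INSEE := by
  intro communes ville code_postal _ _
  unfold Spec_associe_INSEE associe_INSEE associe_INSEE_alt
  by_cases hg : code_postal = "NULL" ∨ ville = "NULL"
  · simp [hg]
  · simp only [hg, if_false]
    rw [bLoop_eq]
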